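-- pv_equiv track=rewrite | github.com/apangnathip/stepping-stones | stepstone/search.py | stepping_stones
-- ===== SOURCE A (Python) =====
-- def stepping_stones(n, ones):
--     initial_board = [[0]*n for i in range(n)]
--     for one in ones:
--         initial_board[one[0]][one[1]] = 1
--
--     # Process below is sort of redundant as it goes through EVERY cell
--     # and not just ones affected by change but its 1:43 AM right now and
--     # I'm barely functioning.
--     def neighbour_sum(board):
--         """Checks each cell on the board for its sum by neighbours"""
--         sums = {} # The sums here is a dictionary of keys according to the sum and the value being sets of positions
--         for i in range(n): # Loop through every cell
--             for j in range(n):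
--                 if board[i][j]: continue
--                 sum = 0
--                 for k in range(-1, 2): # Loop through neighbours
--                     for l in range(-1, 2):
--                         if k == 0 and l == 0 or i+k < 0 or j+l < 0: continue
--                         try: # In the case where the index is out of range, just ignore
--                             sum += board[i+k][j+l]
--                         except: continue
--                 if sum > 1:
--                     if sum not in sums:
--                         sums[sum] = set()
--                     sums[sum].add((i, j))
--         return sums
--
--     highest = [] # List of highest number reached for each branch
--     def recursive_placing(num, board): # The recursion here is travelling down a tree with several branches
--         """Recursive function that goes through every possibility of stone placement"""
--         sums = neighbour_sum(board)
--         if num not in sums: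
--             highest.append(num - 1)
--             return
--         for pos in sums[num]:
--             copyboard = [row[:] for row in board] # Prevents a recursion's board from affecting another recursion's board
--             copyboard[pos[0]][pos[1]] = num
--             recursive_placing(num+1, copyboard)
--
--     recursive_placing(2, initial_board)
--     return max(highest)
-- ===== SOURCE B (Python) =====
-- def stepping_stones(n, ones):
--     # Backtracking on a single mutable board with an incrementally maintained
--     # neighbour-sum matrix: placing/removing a stone only touches the 8
--     # neighbours (undo instead of copying the board each branch).
--     grid = [[0] * n for _ in range(n)]
--     nsum = [[0] * n for _ in range(n)]
--
--     def bump(a, b, v):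
--         for da, db in ((-1, -1), (-1, 0), (-1, 1), (0, -1),
--                        (0, 1), (1, -1), (1, 0), (1, 1)):
--             x, y = a + da, b + db
--             if 0 <= x < n and 0 <= y < n:
--                 nsum[x][y] += v
--
--     for a, b in ones:
--         if grid[a][b] == 0:
--             grid[a][b] = 1
--             bump(a, b, 1)
--
--     def best(num):
--         cand = [(i, j) for i in range(n) for j in range(n)
--                 if grid[i][j] == 0 and nsum[i][j] == num]
--         top = num - 1
--         for a, b in cand:
--             grid[a][b] = num
--             bump(a, b, num)
--             top = max(top, best(num + 1))
--             bump(a, b, -num)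
--             grid[a][b] = 0
--         return top
--
--     return best(2)
-- ===== Notes on version B (the rewrite author's own statement) =====
-- stated objective: alternative
-- what changed: B backtracks on one mutable board with an incrementally maintained neighbour-sum matrix (placing/undoing a stone updates only its 8 neighbours, undo instead of copying) and returns the running maximum directly, instead of A's copying the whole board at every branch, rebuilding a dict of 9-cell neighbour sums for every cell at every node, and appending every leaf to a global list that is maxed at the end.
-- outside the precondition, e.g. on stepping_stones(4, [(-2, 0), (-2, -3)]): A returns 9, B returns 1
import Mathlib
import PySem

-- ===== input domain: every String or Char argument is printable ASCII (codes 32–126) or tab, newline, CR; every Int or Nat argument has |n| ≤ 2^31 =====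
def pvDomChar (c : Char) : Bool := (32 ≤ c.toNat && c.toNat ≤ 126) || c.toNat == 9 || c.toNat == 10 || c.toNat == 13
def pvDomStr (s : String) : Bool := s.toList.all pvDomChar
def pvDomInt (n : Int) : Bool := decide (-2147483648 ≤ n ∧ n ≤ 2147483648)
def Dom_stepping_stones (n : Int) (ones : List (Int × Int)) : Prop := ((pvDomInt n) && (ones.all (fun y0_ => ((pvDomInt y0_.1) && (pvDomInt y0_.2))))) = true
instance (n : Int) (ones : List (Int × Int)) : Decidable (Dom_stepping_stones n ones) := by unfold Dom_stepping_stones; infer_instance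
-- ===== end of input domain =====

-- B replaces A's per-node board copies and full dict-of-neighbour-sums rebuild by
-- backtracking on one board with an incrementally maintained neighbour-sum matrix,
-- returning the running maximum directly (objective: alternative; both explore the
-- same search tree). Equivalence is about the return value.

-- ===== PORT A =====

-- total nested read: used where A indexes in range, and for A's `try: sum += board[i+k][j+l] except: continue`
-- (adding 0 on IndexError is exactly `continue`); all reads occur at nonnegative indices.
def cellGet (g : List (List Int)) (i j : Int) : Int :=
  match PySem.List.pyGet? g i with
  | none => 0
  | some row => (PySem.List.pyGet? row j).getD 0

-- `g[i][j] = v`; exact for 0 ≤ i, j (all writes of both ports are at in-range nonnegative indices, see Pre_)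
def cellSet (g : List (List Int)) (i j : Int) (v : Int) : List (List Int) :=
  g.modify i.toNat (fun row => row.set j.toNat v)

-- one summand of A's 3×3 neighbour loop body (0 = `continue`)
def nbTerm (board : List (List Int)) (i j k l : Int) : Int :=
  if (k = 0 ∧ l = 0) ∨ i + k < 0 ∨ j + l < 0 then 0 else cellGet board (i + k) (j + l)

def nbSum (board : List (List Int)) (i j : Int) : Int :=
  (PySem.List.pyRange (-1) 2 1).foldl (fun s k =>
    (PySem.List.pyRange (-1) 2 1).foldl (fun s l => s + nbTerm board i j k l) s) 0

-- A's neighbour_sum: dict from sum value to the set of empty positions with that sum (> 1)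
def nsumDict (n : Int) (board : List (List Int)) : PySem.Dict Int (PySem.Set (Int × Int)) :=
  (PySem.List.pyRange 0 n 1).foldl (fun d i =>
    (PySem.List.pyRange 0 n 1).foldl (fun d j =>
      if cellGet board i j ≠ 0 then d
      else
        let s := nbSum board i j
        if s > 1 then d.insert s (PySem.Set.add ((d.get? s).getD PySem.Set.empty) (i, j))
        else d) d) PySem.Dict.empty

-- A's recursive_placing; returns the `highest` list of this subtree.  fuel is a totality
-- guard only (each placement fills an empty cell, so n*n+1 levels are never exhausted).
def recA (fuel : Nat) (num : Int) (n : Int) (board : List (List Int)) : List Int :=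
  match fuel with
  | 0 => [num - 1]
  | fuel + 1 =>
    match (nsumDict n board).get? num with
    | none => [num - 1]
    | some s =>
      s.foldl (fun acc pos => acc ++ recA fuel (num + 1) n (cellSet board pos.1 pos.2 num)) []

def stepping_stones (n : Int) (ones : List (Int × Int)) : Int :=
  let board := ones.foldl (fun b p => cellSet b p.1 p.2 1)
      (List.replicate n.toNat (List.replicate n.toNat 0))
  (PySem.List.max? (recA (n.toNat * n.toNat + 1) 2 n board) (fun x => x)).getD 0
  -- `max(highest)`: the list is never empty, so `.getD 0` is never consulted

-- ===== PORT B =====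

def offs : List (Int × Int) := [(-1,-1),(-1,0),(-1,1),(0,-1),(0,1),(1,-1),(1,0),(1,1)]

-- B's bump(a,b,v): add v to the neighbour-sum of the 8 in-range neighbours of (a,b)
def bump (n : Int) (m : List (List Int)) (a b v : Int) : List (List Int) :=
  offs.foldl (fun m d =>
    if 0 ≤ a + d.1 ∧ a + d.1 < n ∧ 0 ≤ b + d.2 ∧ b + d.2 < n then
      cellSet m (a + d.1) (b + d.2) (cellGet m (a + d.1) (b + d.2) + v)
    else m) m

-- B's candidate comprehension: empty cells whose maintained neighbour sum equals num
def candScan (n num : Int) (grid nsum : List (List Int)) : List (Int × Int) :=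
  (PySem.List.pyRange 0 n 1).foldl (fun acc i =>
    (PySem.List.pyRange 0 n 1).foldl (fun acc j =>
      if cellGet grid i j = 0 ∧ cellGet nsum i j = num then acc ++ [(i, j)] else acc) acc) []

-- B's best(num): running maximum over branches; the in-place place/undo pair of Source B
-- becomes passing the updated pair down and keeping the old one (same fuel guard as recA).
def recB (fuel : Nat) (num n : Int) (grid nsum : List (List Int)) : Int :=
  match fuel with
  | 0 => num - 1
  | fuel + 1 =>
    (candScan n num grid nsum).foldl (fun top p =>
      max top (recB fuel (num + 1) n (cellSet grid p.1 p.2 num) (bump n nsum p.1 p.2 num)))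
      (num - 1)

def stepping_stones_alt (n : Int) (ones : List (Int × Int)) : Int :=
  let zero := List.replicate n.toNat (List.replicate n.toNat 0)
  let st := ones.foldl (fun (st : List (List Int) × List (List Int)) p =>
      if cellGet st.1 p.1 p.2 = 0 then (cellSet st.1 p.1 p.2 1, bump n st.2 p.1 p.2 1)
      else st) (zero, zero)
  recB (n.toNat * n.toNat + 1) 2 n st.1 st.2

-- ===== PRECONDITION & SPEC =====

-- Pre_ excludes out-of-range stone coordinates: for an index ≥ n or < -n A raises IndexError,
-- and for a negative in-range index A silently wraps around (an artefact of Python indexing);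
-- the function's natural domain is board coordinates 0 ≤ i, j < n.
def Pre_stepping_stones (n : Int) (ones : List (Int × Int)) : Prop :=
  ∀ p ∈ ones, 0 ≤ p.1 ∧ p.1 < n ∧ 0 ≤ p.2 ∧ p.2 < n
instance (n : Int) (ones : List (Int × Int)) : Decidable (Pre_stepping_stones n ones) := by
  unfold Pre_stepping_stones; infer_instance

def pvWitness_stepping_stones : Int × (List (Int × Int)) := (2, [(0, 0)])

def Spec_stepping_stones (n : Int) (ones : List (Int × Int)) (out : Int) : Prop := out = stepping_stones_alt n ones
instance (n : Int) (ones : List (Int × Int)) (out : Int) : Decidable (Spec_stepping_stones n ones out) := by unfold Spec_stepping_stones; infer_instance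

-- ===== CLAIM (what is proved, stated in full; the proofs are below) =====
def Claim_equal_stepping_stones : Prop := ∀ (n : Int) (ones : List (Int × Int)), Dom_stepping_stones n ones → Pre_stepping_stones n ones → Spec_stepping_stones n ones (stepping_stones n ones)

-- ===== LEMMAS AND PROOFS =====

-- well-formed n×n matrix
def WF (n : Int) (g : List (List Int)) : Prop :=
  g.length = n.toNat ∧ ∀ k : Nat, k < n.toNat → (g[k]?.getD []).length = n.toNat

-- the invariant tying B's maintained neighbour-sum matrix to A's board
def INV (n : Int) (board nsum : List (List Int)) : Prop :=
  WF n board ∧ WF n nsum ∧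
    ∀ i j : Int, 0 ≤ i → i < n → 0 ≤ j → j < n → cellGet nsum i j = nbSum board i j

theorem cellGet_nonneg_eq (g : List (List Int)) (i j : Int) (hi : 0 ≤ i) (hj : 0 ≤ j) :
    cellGet g i j = ((g[i.toNat]?.getD [])[j.toNat]?).getD 0 := by
  unfold cellGet
  rw [PySem.List.pyGet?_of_nonneg g hi]
  cases h : g[i.toNat]? with
  | none => simp
  | some row =>
    show (PySem.List.pyGet? row j).getD 0 = _
    rw [PySem.List.pyGet?_of_nonneg row hj]
    simp

-- Nat-index core of cellGet/cellSet
theorem valSet (g : List (List Int)) (a b : Nat) (v : Int) (ha : a < g.length)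
    (hb : b < (g[a]?.getD []).length) (i j : Nat) :
    (((g.modify a (fun r => r.set b v))[i]?.getD [])[j]?.getD 0)
      = if i = a ∧ j = b then v else ((g[i]?.getD [])[j]?.getD 0) := by
  rw [List.getElem?_modify]
  by_cases hia : a = i
  · subst hia
    have hg : g[a]? = some g[a] := List.getElem?_eq_getElem ha
    rw [hg] at hb ⊢
    simp only [Option.getD_some] at hb
    have hfe : (fun r => if a = a then r.set b v else r) = (fun r : List Int => r.set b v) := by
      funext r; rw [if_pos rfl]
    rw [hfe]
    show ((g[a].set b v)[j]?).getD 0 = _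
    simp only [true_and]
    rw [List.getElem?_set]
    by_cases hjb : b = j
    · subst hjb
      rw [if_pos rfl, if_pos hb]
      simp
    · rw [if_neg hjb, if_neg (fun h => hjb h.symm)]; rfl
  · have : (fun r => if a = i then r.set b v else r) <$> g[i]? = g[i]? := by
      cases g[i]? <;> simp [hia]
    rw [this, if_neg (by rintro ⟨rfl, -⟩; exact hia rfl)]

theorem cellGet_cellSet (n : Int) (g : List (List Int)) (hw : WF n g) (a b v : Int)
    (ha : 0 ≤ a) (ha' : a < n) (hb : 0 ≤ b) (hb' : b < n) (i j : Int) (hi : 0 ≤ i) (hj : 0 ≤ j) :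
    cellGet (cellSet g a b v) i j = if i = a ∧ j = b then v else cellGet g i j := by
  have hna : a.toNat < g.length := by
    rw [hw.1]; omega
  have hnb : b.toNat < (g[a.toNat]?.getD []).length := by
    rw [List.getElem?_eq_getElem hna]
    have := hw.2 a.toNat (by omega)
    rw [List.getElem?_eq_getElem hna] at this
    simp only [Option.getD_some] at this ⊢
    omega
  rw [cellGet_nonneg_eq _ _ _ hi hj, cellGet_nonneg_eq _ _ _ hi hj]
  unfold cellSet
  rw [valSet g a.toNat b.toNat v hna hnb]
  by_cases h : i = a ∧ j = b
  · rw [if_pos h, if_pos (by omega)]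
  · rw [if_neg (by omega), if_neg h]

theorem WF_cellSet (n : Int) (g : List (List Int)) (hw : WF n g) (a b v : Int) :
    WF n (cellSet g a b v) := by
  unfold cellSet
  refine ⟨by rw [List.length_modify]; exact hw.1, fun k hk => ?_⟩
  rw [List.getElem?_modify]
  have := hw.2 k hk
  cases h : g[k]? with
  | none => simpa [h] using this
  | some r =>
    rw [h] at this
    simp only [Option.map_some, Option.getD_some] at this ⊢
    split <;> simp [List.length_set, this]

theorem cellSet_self (n : Int) (g : List (List Int)) (hw : WF n g) (a b : Int)
    (ha : 0 ≤ a) (hb : 0 ≤ b) (h : cellGet g a b = 1) : cellSet g a b 1 = g := by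
  rw [cellGet_nonneg_eq _ _ _ ha hb] at h
  unfold cellSet
  cases hg : g[a.toNat]? with
  | none => simp [hg] at h
  | some row =>
    cases hr : row[b.toNat]? with
    | none => simp [hg, hr] at h
    | some v =>
      rw [hg] at h; simp only [Option.getD_some] at h
      rw [hr] at h; simp only [Option.getD_some] at h
      subst h
      have hbl : b.toNat < row.length := (List.getElem?_eq_some_iff.mp hr).1
      have hrow : row.set b.toNat 1 = row := by
        have : row[b.toNat] = 1 := by
          have := List.getElem?_eq_getElem hbl
          rw [hr] at this; exact (Option.some.injEq _ _).mp this.symm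
        rw [← this]; exact List.set_getElem_self hbl
      apply List.ext_getElem?
      intro k
      rw [List.getElem?_modify]
      cases hk : g[k]? with
      | none => rfl
      | some r =>
        show some (if a.toNat = k then r.set b.toNat 1 else r) = some r
        by_cases hak : a.toNat = k
        · subst hak; rw [hk] at hg; cases hg; rw [if_pos rfl, hrow]
        · rw [if_neg hak]

theorem WF_bump_aux (n a b v : Int) : ∀ (ds : List (Int × Int)) (m : List (List Int)), WF n m →
    WF n (ds.foldl (fun m d =>
      if 0 ≤ a + d.1 ∧ a + d.1 < n ∧ 0 ≤ b + d.2 ∧ b + d.2 < n then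
        cellSet m (a + d.1) (b + d.2) (cellGet m (a + d.1) (b + d.2) + v)
      else m) m) := by
  intro ds
  induction ds with
  | nil => intro m hm; exact hm
  | cons d ds ih =>
    intro m hm
    simp only [List.foldl_cons]
    apply ih
    split
    · exact WF_cellSet n m hm _ _ _
    · exact hm

theorem WF_bump (n : Int) (m : List (List Int)) (hw : WF n m) (a b v : Int) :
    WF n (bump n m a b v) := WF_bump_aux n a b v offs m hw

theorem bump_get_aux (n a b v i j : Int) (hi : 0 ≤ i) (hi' : i < n) (hj : 0 ≤ j) (hj' : j < n) :
    ∀ (ds : List (Int × Int)), ds.Nodup → ∀ (m : List (List Int)), WF n m →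
    cellGet (ds.foldl (fun m d =>
      if 0 ≤ a + d.1 ∧ a + d.1 < n ∧ 0 ≤ b + d.2 ∧ b + d.2 < n then
        cellSet m (a + d.1) (b + d.2) (cellGet m (a + d.1) (b + d.2) + v)
      else m) m) i j = cellGet m i j + (if (i - a, j - b) ∈ ds then v else 0) := by
  intro ds
  induction ds with
  | nil => intro _ m _; simp
  | cons d ds ih =>
    intro hnd m hm
    simp only [List.foldl_cons]
    have hm' : WF n (if 0 ≤ a + d.1 ∧ a + d.1 < n ∧ 0 ≤ b + d.2 ∧ b + d.2 < n then
        cellSet m (a + d.1) (b + d.2) (cellGet m (a + d.1) (b + d.2) + v) else m) := by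
      split
      · exact WF_cellSet n m hm _ _ _
      · exact hm
    rw [ih hnd.of_cons _ hm']
    by_cases hd : (i - a, j - b) = d
    · have hC : 0 ≤ a + d.1 ∧ a + d.1 < n ∧ 0 ≤ b + d.2 ∧ b + d.2 < n := by
        have h1 : d.1 = i - a := by rw [← hd]
        have h2 : d.2 = j - b := by rw [← hd]
        omega
      have hij : i = a + d.1 ∧ j = b + d.2 := by
        have h1 : d.1 = i - a := by rw [← hd]
        have h2 : d.2 = j - b := by rw [← hd]
        omega
      rw [if_pos hC, cellGet_cellSet n m hm _ _ _ hC.1 hC.2.1 hC.2.2.1 hC.2.2.2 i j hi hj,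
        if_pos hij]
      have hmem : (i - a, j - b) ∈ d :: ds := by rw [hd]; exact List.mem_cons_self
      have hnotmem : (i - a, j - b) ∉ ds := by rw [hd]; exact (List.nodup_cons.mp hnd).1
      rw [if_pos hmem, if_neg hnotmem, ← hij.1, ← hij.2]
      ring
    · have hsame : cellGet (if 0 ≤ a + d.1 ∧ a + d.1 < n ∧ 0 ≤ b + d.2 ∧ b + d.2 < n then
          cellSet m (a + d.1) (b + d.2) (cellGet m (a + d.1) (b + d.2) + v) else m) i j
          = cellGet m i j := by
        split
        · next hC =>
          rw [cellGet_cellSet n m hm _ _ _ hC.1 hC.2.1 hC.2.2.1 hC.2.2.2 i j hi hj,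
            if_neg (by
              intro hij2
              apply hd
              have h1 := hij2.1
              have h2 := hij2.2
              obtain ⟨d1, d2⟩ := d
              simp only [Prod.mk.injEq]
              constructor <;> omega)]
        · rfl
      rw [hsame]
      by_cases hmem : (i - a, j - b) ∈ ds
      · rw [if_pos hmem, if_pos (List.mem_cons_of_mem d hmem)]
      · rw [if_neg hmem, if_neg (by
          intro h
          rcases List.mem_cons.mp h with h1 | h2
          exacts [hd h1, hmem h2])]

theorem cellGet_bump (n : Int) (m : List (List Int)) (hw : WF n m) (a b v i j : Int)
    (hi : 0 ≤ i) (hi' : i < n) (hj : 0 ≤ j) (hj' : j < n) :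
    cellGet (bump n m a b v) i j = cellGet m i j + (if (i - a, j - b) ∈ offs then v else 0) :=
  bump_get_aux n a b v i j hi hi' hj hj' offs (by decide) m hw

set_option maxHeartbeats 1600000 in
theorem nbSum_cellSet (n : Int) (board : List (List Int)) (hw : WF n board) (a b : Int)
    (ha : 0 ≤ a) (ha' : a < n) (hb : 0 ≤ b) (hb' : b < n) (h0 : cellGet board a b = 0)
    (v i j : Int) (hi : 0 ≤ i) (hj : 0 ≤ j) :
    nbSum (cellSet board a b v) i j = nbSum board i j + (if (i - a, j - b) ∈ offs then v else 0) := by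
  have hterm : ∀ k l : Int, nbTerm (cellSet board a b v) i j k l
      = nbTerm board i j k l + (if k = a - i ∧ l = b - j ∧ ¬(k = 0 ∧ l = 0) then v else 0) := by
    intro k l
    unfold nbTerm
    by_cases hg : (k = 0 ∧ l = 0) ∨ i + k < 0 ∨ j + l < 0
    · rw [if_pos hg, if_pos hg, if_neg (by omega)]; ring
    · rw [if_neg hg, if_neg hg]
      rw [cellGet_cellSet n board hw a b v ha ha' hb hb' (i + k) (j + l) (by omega) (by omega)]
      by_cases hhit : i + k = a ∧ j + l = b
      · rw [if_pos hhit, if_pos (by omega)]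
        have : cellGet board (i + k) (j + l) = 0 := by
          rw [hhit.1, hhit.2]; exact h0
        rw [this]; ring
      · rw [if_neg hhit, if_neg (by omega)]; ring
  have hpr : PySem.List.pyRange (-1) 2 1 = [-1, 0, 1] := by decide
  unfold nbSum
  rw [hpr]
  simp only [List.foldl_cons, List.foldl_nil, hterm]
  simp only [offs, List.mem_cons, List.not_mem_nil, or_false, Prod.mk.injEq]
  norm_num
  split_ifs <;> omega

theorem INV_step (n : Int) (board nsum : List (List Int)) (h : INV n board nsum) (a b v : Int)
    (ha : 0 ≤ a) (ha' : a < n) (hb : 0 ≤ b) (hb' : b < n) (h0 : cellGet board a b = 0) :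
    INV n (cellSet board a b v) (bump n nsum a b v) := by
  obtain ⟨hwb, hws, hinv⟩ := h
  refine ⟨WF_cellSet n board hwb a b v, WF_bump n nsum hws a b v, fun i j hi hi' hj hj' => ?_⟩
  rw [cellGet_bump n nsum hws a b v i j hi hi' hj hj', hinv i j hi hi' hj hj',
    nbSum_cellSet n board hwb a b ha ha' hb hb' h0 v i j hi hj]

-- row-major list of all cells
def cells (n : Int) : List (Int × Int) :=
  (PySem.List.pyRange 0 n 1).flatMap (fun i => (PySem.List.pyRange 0 n 1).map (fun j => (i, j)))

theorem foldl_nested_cells {δ : Type} (n : Int) (f : δ → Int → Int → δ) (d0 : δ) :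
    (PySem.List.pyRange 0 n 1).foldl (fun d i =>
      (PySem.List.pyRange 0 n 1).foldl (fun d j => f d i j) d) d0
      = (cells n).foldl (fun d c => f d c.1 c.2) d0 := by
  unfold cells
  rw [List.foldl_flatMap]
  simp only [List.foldl_map]

theorem nodup_cells (n : Int) : (cells n).Nodup := by
  unfold cells
  rw [List.nodup_flatMap]
  refine ⟨fun i _ => ?_, ?_⟩
  · exact List.Nodup.map (fun a b h => by simpa using congrArg Prod.snd h)
      (PySem.List.nodup_pyRange_one 0 n)
  · refine (PySem.List.pairwise_lt_pyRange_one 0 n).imp ?_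
    intro a b hab
    intro c hca hcb
    simp only [List.mem_map] at hca hcb
    obtain ⟨j1, -, rfl⟩ := hca
    obtain ⟨j2, -, h2⟩ := hcb
    have := congrArg Prod.fst h2
    simp at this
    omega

theorem mem_cells (n : Int) (c : Int × Int) :
    c ∈ cells n ↔ 0 ≤ c.1 ∧ c.1 < n ∧ 0 ≤ c.2 ∧ c.2 < n := by
  unfold cells
  rw [List.mem_flatMap]
  simp only [List.mem_map, PySem.List.mem_pyRange_one]
  constructor
  · rintro ⟨i, hi, j, hj, rfl⟩
    exact ⟨hi.1, hi.2, hj.1, hj.2⟩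
  · intro h
    exact ⟨c.1, ⟨h.1, h.2.1⟩, c.2, ⟨h.2.2.1, h.2.2.2⟩, rfl⟩

theorem candScan_eq_filter (n num : Int) (grid nsum : List (List Int)) :
    candScan n num grid nsum =
      (cells n).filter (fun c => decide (cellGet grid c.1 c.2 = 0 ∧ cellGet nsum c.1 c.2 = num)) := by
  unfold candScan
  rw [foldl_nested_cells n
    (fun acc i j => if cellGet grid i j = 0 ∧ cellGet nsum i j = num then acc ++ [(i, j)] else acc) []]
  simp only [Prod.mk.eta]
  rw [PySem.List.foldl_append_ite_eq_filter]
  simp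

theorem dict_fold_char (board : List (List Int)) (num : Int) (h1 : 1 < num) :
    ∀ (todo : List (Int × Int)) (d : PySem.Dict Int (PySem.Set (Int × Int))) (L : PySem.Set (Int × Int)),
    (∀ c ∈ todo, c ∉ L) → todo.Nodup →
    d.get? num = (if L = [] then none else some L) →
    (todo.foldl (fun d c =>
        if cellGet board c.1 c.2 ≠ 0 then d
        else
          let s := nbSum board c.1 c.2
          if s > 1 then d.insert s (PySem.Set.add ((d.get? s).getD PySem.Set.empty) c)
          else d) d).get? num
      = (if L ++ todo.filter (fun c => decide (cellGet board c.1 c.2 = 0 ∧ nbSum board c.1 c.2 = num)) = []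
         then none
         else some (L ++ todo.filter (fun c => decide (cellGet board c.1 c.2 = 0 ∧ nbSum board c.1 c.2 = num)))) := by
  intro todo
  induction todo with
  | nil => intro d L _ _ hd; simpa using hd
  | cons c todo ih =>
    intro d L hL hnd hd
    simp only [List.foldl_cons]
    by_cases hc0 : cellGet board c.1 c.2 = 0
    · rw [if_neg (by simpa using hc0)]
      by_cases hcn : nbSum board c.1 c.2 = num
      · -- the key num gets c appended
        have hgt : nbSum board c.1 c.2 > 1 := by omega
        rw [if_pos hgt, hcn]
        have hgetD : (d.get? num).getD PySem.Set.empty = L := by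
          rw [hd]; by_cases hL0 : L = []
          · subst hL0; rfl
          · rw [if_neg hL0]; rfl
        have hadd : PySem.Set.add ((d.get? num).getD PySem.Set.empty) c = L ++ [c] := by
          rw [hgetD]; exact PySem.Set.add_of_not_mem (hL c List.mem_cons_self)
        rw [hadd]
        have := ih (d.insert num (L ++ [c])) (L ++ [c])
          (fun c' hc' hmem => by
            rcases List.mem_append.mp hmem with h | h
            · exact hL c' (List.mem_cons_of_mem c hc') h
            · rcases List.mem_singleton.mp h with rfl
              exact (List.nodup_cons.mp hnd).1 hc')
          (List.nodup_cons.mp hnd).2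
          (by rw [PySem.Dict.get?_insert_self, if_neg (by simp)])
        rw [this, List.filter_cons_of_pos (by simp [hc0, hcn]), ← List.append_cons]
      · -- some other key (or none) is touched; key num unchanged
        have hstep : ∀ d' : PySem.Dict Int (PySem.Set (Int × Int)), d'.get? num = d.get? num →
            (if nbSum board c.1 c.2 > 1
              then d.insert (nbSum board c.1 c.2)
                (PySem.Set.add ((d.get? (nbSum board c.1 c.2)).getD PySem.Set.empty) c)
              else d).get? num = d.get? num := by
          intro _ _
          split
          · exact PySem.Dict.get?_insert_of_ne d _ (fun h => hcn h.symm)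
          · rfl
        rw [List.filter_cons_of_neg (by simp [hcn])]
        exact ih _ L (fun c' hc' => hL c' (List.mem_cons_of_mem c hc')) (List.nodup_cons.mp hnd).2
          (by rw [hstep d rfl]; exact hd)
    · rw [if_pos (by simpa using hc0), List.filter_cons_of_neg (by simp [hc0])]
      exact ih d L (fun c' hc' => hL c' (List.mem_cons_of_mem c hc')) (List.nodup_cons.mp hnd).2 hd

theorem nsumDict_get (n : Int) (board : List (List Int)) (num : Int) (h1 : 1 < num) :
    (nsumDict n board).get? num =
      (if ((cells n).filter (fun c => decide (cellGet board c.1 c.2 = 0 ∧ nbSum board c.1 c.2 = num))) = []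
       then none
       else some ((cells n).filter (fun c => decide (cellGet board c.1 c.2 = 0 ∧ nbSum board c.1 c.2 = num)))) := by
  unfold nsumDict
  rw [foldl_nested_cells n (fun d i j =>
    if cellGet board i j ≠ 0 then d
    else
      let s := nbSum board i j
      if s > 1 then d.insert s (PySem.Set.add ((d.get? s).getD PySem.Set.empty) (i, j))
      else d) PySem.Dict.empty]
  have := dict_fold_char board num h1 (cells n) PySem.Dict.empty []
    (fun c _ h => List.not_mem_nil h) (nodup_cells n) (by simp [PySem.Dict.get?_empty])
  simp only [List.nil_append] at this
  rw [← this]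

theorem recB_ge (fuel : Nat) (num n : Int) (grid nsum : List (List Int)) :
    num - 1 ≤ recB fuel num n grid nsum := by
  cases fuel with
  | zero => simp [recB]
  | succ fuel =>
    simp only [recB]
    exact (PySem.List.le_foldl_max_int (candScan n num grid nsum)
      (fun p => recB fuel (num + 1) n (cellSet grid p.1 p.2 num) (bump n nsum p.1 p.2 num))
      (num - 1)).1

theorem foldl_max_pull (u : List Int) : ∀ A y : Int, u.foldl max (max A y) = max A (u.foldl max y) := by
  induction u with
  | nil => intro A y; rfl
  | cons z u ih =>
    intro A y
    simp only [List.foldl_cons]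
    rw [show max (max A y) z = max A (max y z) from max_assoc A y z, ih A (max y z), ih y z]

theorem foldl_maxg_pull {α : Type} (g : α → Int) (u : List α) :
    ∀ A y : Int, u.foldl (fun t p => max t (g p)) (max A y) = max y (u.foldl (fun t p => max t (g p)) A) := by
  induction u with
  | nil => intro A y; simp [max_comm]
  | cons z u ih =>
    intro A y
    simp only [List.foldl_cons]
    rw [show max (max A y) (g z) = max (max A (g z)) y from by
      rw [max_assoc, max_comm y (g z), ← max_assoc], ih (max A (g z)) y]

theorem max?_flatMap {α : Type} (cand : List α) (hne : cand ≠ []) (Ls : α → List Int) (g : α → Int) (lo : Int)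
    (h : ∀ p ∈ cand, Ls p ≠ [] ∧ PySem.List.max? (Ls p) (fun x => x) = some (g p))
    (hlo : ∀ p ∈ cand, lo < g p) :
    PySem.List.max? (cand.flatMap Ls) (fun x => x) =
      some (cand.foldl (fun t p => max t (g p)) lo) ∧ cand.flatMap Ls ≠ [] := by
  induction cand generalizing lo with
  | nil => exact absurd rfl hne
  | cons c rest ih =>
    have hc := h c List.mem_cons_self
    obtain ⟨x, t, hxt⟩ : ∃ x t, Ls c = x :: t := by
      cases hLc : Ls c with
      | nil => exact absurd hLc hc.1
      | cons x t => exact ⟨x, t, rfl⟩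
    have hmc : t.foldl max x = g c := by
      have := hc.2
      rw [hxt, PySem.List.max?_id_cons] at this
      exact Option.some.inj this
    cases rest with
    | nil =>
      simp only [List.flatMap_cons, List.flatMap_nil, List.append_nil, List.foldl_cons, List.foldl_nil]
      refine ⟨?_, by rw [hxt]; simp⟩
      rw [hxt, PySem.List.max?_id_cons, hmc]
      have : max lo (g c) = g c := max_eq_right (le_of_lt (hlo c List.mem_cons_self))
      rw [this]
    | cons r2 rest2 =>
      have ihr := ih (by simp) lo (fun p hp => h p (List.mem_cons_of_mem c hp))
        (fun p hp => hlo p (List.mem_cons_of_mem c hp))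
      obtain ⟨y, u, hyu⟩ : ∃ y u, (r2 :: rest2).flatMap Ls = y :: u := by
        cases hM : (r2 :: rest2).flatMap Ls with
        | nil => exact absurd hM ihr.2
        | cons y u => exact ⟨y, u, rfl⟩
      have hmM : u.foldl max y = (r2 :: rest2).foldl (fun t p => max t (g p)) lo := by
        have := ihr.1
        rw [hyu, PySem.List.max?_id_cons] at this
        exact Option.some.inj this
      constructor
      · show PySem.List.max? (Ls c ++ (r2 :: rest2).flatMap Ls) (fun x => x) = _
        rw [hxt, hyu]
        show PySem.List.max? (x :: (t ++ y :: u)) (fun x => x) = _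
        rw [PySem.List.max?_id_cons, List.foldl_append]
        simp only [List.foldl_cons]
        rw [foldl_max_pull u (t.foldl max x) y, hmc, hmM]
        show _ = some ((r2 :: rest2).foldl (fun t p => max t (g p)) (max lo (g c)))
        rw [foldl_maxg_pull g (r2 :: rest2) lo (g c)]
      · show Ls c ++ (r2 :: rest2).flatMap Ls ≠ []
        rw [hxt]; simp

theorem main_rec (fuel : Nat) : ∀ (num n : Int) (board nsum : List (List Int)),
    2 ≤ num → INV n board nsum →
    recA fuel num n board ≠ [] ∧
      PySem.List.max? (recA fuel num n board) (fun x => x) = some (recB fuel num n board nsum) := by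
  induction fuel with
  | zero =>
    intro num n board nsum _ _
    refine ⟨by simp [recA], ?_⟩
    simp only [recA, recB]
    rw [PySem.List.max?_id_cons]
    simp
  | succ fuel ih =>
    intro num n board nsum h2 hinv
    have hfilter : candScan n num board nsum
        = (cells n).filter (fun c => decide (cellGet board c.1 c.2 = 0 ∧ nbSum board c.1 c.2 = num)) := by
      rw [candScan_eq_filter]
      apply List.filter_congr
      intro c hc
      have hb := (mem_cells n c).mp hc
      rw [hinv.2.2 c.1 c.2 hb.1 hb.2.1 hb.2.2.1 hb.2.2.2]
    have hdict := nsumDict_get n board num (by omega)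
    rw [← hfilter] at hdict
    by_cases hempty : candScan n num board nsum = []
    · rw [if_pos hempty] at hdict
      refine ⟨by simp [recA, hdict], ?_⟩
      simp only [recA, recB, hdict, hempty, List.foldl_nil]
      rw [PySem.List.max?_id_cons]
      simp
    · rw [if_neg hempty] at hdict
      have hper : ∀ p ∈ candScan n num board nsum,
          recA fuel (num + 1) n (cellSet board p.1 p.2 num) ≠ [] ∧
          PySem.List.max? (recA fuel (num + 1) n (cellSet board p.1 p.2 num)) (fun x => x)
            = some (recB fuel (num + 1) n (cellSet board p.1 p.2 num) (bump n nsum p.1 p.2 num)) := by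
        intro p hp
        rw [hfilter] at hp
        have hb := (mem_cells n p).mp (List.mem_of_mem_filter hp)
        have hp0 : cellGet board p.1 p.2 = 0 := by
          have := List.of_mem_filter hp
          simp only [decide_eq_true_eq] at this
          exact this.1
        exact ih (num + 1) n _ _ (by omega)
          (INV_step n board nsum hinv p.1 p.2 num hb.1 hb.2.1 hb.2.2.1 hb.2.2.2 hp0)
      have hlo : ∀ p ∈ candScan n num board nsum,
          num - 1 < recB fuel (num + 1) n (cellSet board p.1 p.2 num) (bump n nsum p.1 p.2 num) := by
        intro p _
        have := recB_ge fuel (num + 1) n (cellSet board p.1 p.2 num) (bump n nsum p.1 p.2 num)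
        omega
      have hmf := max?_flatMap (candScan n num board nsum) hempty
        (fun pos => recA fuel (num + 1) n (cellSet board pos.1 pos.2 num))
        (fun p => recB fuel (num + 1) n (cellSet board p.1 p.2 num) (bump n nsum p.1 p.2 num))
        (num - 1) hper hlo
      have hA : recA (fuel + 1) num n board
          = (candScan n num board nsum).flatMap
              (fun pos => recA fuel (num + 1) n (cellSet board pos.1 pos.2 num)) := by
        show (match (nsumDict n board).get? num with
          | none => [num - 1]
          | some s => s.foldl (fun (acc : List Int) (pos : Int × Int) =>
              acc ++ recA fuel (num + 1) n (cellSet board pos.1 pos.2 num)) []) = _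
        rw [hdict]
        show List.foldl (fun (acc : List Int) (pos : Int × Int) =>
            acc ++ recA fuel (num + 1) n (cellSet board pos.1 pos.2 num)) [] (candScan n num board nsum) = _
        rw [PySem.List.foldl_append_eq_flatMap]
        simp
      refine ⟨by rw [hA]; exact hmf.2, ?_⟩
      rw [hA, hmf.1]
      rfl

theorem init_fold (n : Int) : ∀ (ones : List (Int × Int)), Pre_stepping_stones n ones →
    ∀ (board nsum : List (List Int)), INV n board nsum →
    (∀ i j : Int, 0 ≤ i → i < n → 0 ≤ j → j < n → cellGet board i j = 0 ∨ cellGet board i j = 1) →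
    (ones.foldl (fun (st : List (List Int) × List (List Int)) p =>
        if cellGet st.1 p.1 p.2 = 0 then (cellSet st.1 p.1 p.2 1, bump n st.2 p.1 p.2 1)
        else st) (board, nsum)).1 = ones.foldl (fun b p => cellSet b p.1 p.2 1) board ∧
    INV n (ones.foldl (fun b p => cellSet b p.1 p.2 1) board)
        (ones.foldl (fun (st : List (List Int) × List (List Int)) p =>
          if cellGet st.1 p.1 p.2 = 0 then (cellSet st.1 p.1 p.2 1, bump n st.2 p.1 p.2 1)
          else st) (board, nsum)).2 := by
  intro ones
  induction ones with
  | nil =>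
    intro _ board nsum hinv _
    exact ⟨rfl, hinv⟩
  | cons p ones ih =>
    intro hpre board nsum hinv h01
    have hp := hpre p List.mem_cons_self
    have hpre' : Pre_stepping_stones n ones := fun q hq => hpre q (List.mem_cons_of_mem p hq)
    simp only [List.foldl_cons]
    by_cases h0 : cellGet board p.1 p.2 = 0
    · rw [if_pos h0]
      exact ih hpre' (cellSet board p.1 p.2 1) (bump n nsum p.1 p.2 1)
        (INV_step n board nsum hinv p.1 p.2 1 hp.1 hp.2.1 hp.2.2.1 hp.2.2.2 h0)
        (fun i j hi hi' hj hj' => by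
          rw [cellGet_cellSet n board hinv.1 p.1 p.2 1 hp.1 hp.2.1 hp.2.2.1 hp.2.2.2 i j hi hj]
          split
          · exact Or.inr rfl
          · exact h01 i j hi hi' hj hj')
    · rw [if_neg h0]
      have h1 : cellGet board p.1 p.2 = 1 :=
        (h01 p.1 p.2 hp.1 hp.2.1 hp.2.2.1 hp.2.2.2).resolve_left h0
      rw [cellSet_self n board hinv.1 p.1 p.2 hp.1 hp.2.2.1 h1]
      exact ih hpre' board nsum hinv h01

theorem cellGet_replicate (m : Nat) (i j : Int) :
    cellGet (List.replicate m (List.replicate m 0)) i j = 0 := by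
  unfold cellGet
  cases h : PySem.List.pyGet? (List.replicate m (List.replicate m (0 : Int))) i with
  | none => rfl
  | some row =>
    have hrow := List.eq_of_mem_replicate (PySem.List.mem_of_pyGet?_eq_some _ h)
    subst hrow
    show (PySem.List.pyGet? (List.replicate m (0 : Int)) j).getD 0 = 0
    cases h2 : PySem.List.pyGet? (List.replicate m (0 : Int)) j with
    | none => rfl
    | some v =>
      have := List.eq_of_mem_replicate (PySem.List.mem_of_pyGet?_eq_some _ h2)
      simp [this]

theorem WF_replicate (n : Int) : WF n (List.replicate n.toNat (List.replicate n.toNat (0 : Int))) := by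
  refine ⟨List.length_replicate, fun k hk => ?_⟩
  rw [List.getElem?_replicate, if_pos hk]
  simp

theorem nbSum_replicate (m : Nat) (i j : Int) :
    nbSum (List.replicate m (List.replicate m 0)) i j = 0 := by
  have ht : ∀ k l : Int, nbTerm (List.replicate m (List.replicate m 0)) i j k l = 0 := by
    intro k l
    unfold nbTerm
    split
    · rfl
    · exact cellGet_replicate m _ _
  have hpr : PySem.List.pyRange (-1) 2 1 = [-1, 0, 1] := by decide
  unfold nbSum
  rw [hpr]
  simp [ht]

theorem INV_zero (n : Int) :
    INV n (List.replicate n.toNat (List.replicate n.toNat 0)) (List.replicate n.toNat (List.replicate n.toNat 0)) := by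
  exact ⟨WF_replicate n, WF_replicate n, fun i j _ _ _ _ => by
    rw [cellGet_replicate, nbSum_replicate]⟩

theorem zero_or_one_zero (n : Int) : ∀ i j : Int, 0 ≤ i → i < n → 0 ≤ j → j < n →
    cellGet (List.replicate n.toNat (List.replicate n.toNat 0)) i j = 0 ∨
    cellGet (List.replicate n.toNat (List.replicate n.toNat 0)) i j = 1 :=
  fun i j _ _ _ _ => Or.inl (cellGet_replicate n.toNat i j)

-- ===== VERDICT (by name: the statement is the Claim_ definition above) =====
theorem stepping_stones_spec : Claim_equal_stepping_stones := by
  intro n ones _hdom hpre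
  have h := init_fold n ones hpre _ _ (INV_zero n) (zero_or_one_zero n)
  have hm := main_rec (n.toNat * n.toNat + 1) 2 n _ _ (le_refl 2) h.2
  unfold Spec_stepping_stones stepping_stones stepping_stones_alt
  simp only [h.1, hm.2, Option.getD_some]
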